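-- pv_equiv track=rewrite | github.com/insoochung/rtl-semantics-design-verification | parser/cdfg_extractor.py | preprocess_always_str
-- ===== SOURCE A (Python) =====
-- def preprocess_always_str(always_str):
--   # 1. Remove comments and break multi statement lines in always blocks.
--   lines = always_str.split("\n")
--   lines = [line.split("//")[0] for line in lines]
--   lines = [line for line in lines if line.strip()]
--   always_str = "\n".join(lines)
--
--   # 2. Merge multi-line statements into a single line.
--   lines = always_str.split("\n")
--   for i, line in enumerate(lines):
--     if any(x in line for x in ["case", "if", "else", ":", ";", "begin", "end"]):
--       lines[i] += "\n"
--
--   # 3. Replace multiple spaces with a single space.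
--   res = "".join(lines)
--   lines = res.split("\n")
--   for i, line in enumerate(lines):
--     indent_size = len(line) - len(line.lstrip())
--     lines[i] = " " * indent_size + " ".join(line.split()) + "\n"
--   res = "".join(lines)
--   return res
-- ===== SOURCE B (Python) =====
-- KEYWORDS = ("case", "if", "else", ":", ";", "begin", "end")
--
--
-- def preprocess_always_str(always_str):
--   # Single pass: strip comments, skip blank lines, accumulate a buffer that is
--   # flushed (normalized) whenever a line contains a keyword/punctuation token;
--   # the remaining buffer is flushed once at the end.
--   out = []
--   buf = ""
--
--   def flush(seg):
--     indent_size = len(seg) - len(seg.lstrip())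
--     out.append(" " * indent_size + " ".join(seg.split()) + "\n")
--
--   for raw in always_str.split("\n"):
--     line = raw.split("//")[0]
--     if not line.strip():
--       continue
--     buf += line
--     if any(k in line for k in KEYWORDS):
--       flush(buf)
--       buf = ""
--   flush(buf)
--   return "".join(out)
-- ===== Notes on version B (the rewrite author's own statement) =====
-- stated objective: simpler
-- what changed: Replaces A's four split/join passes (comment strip + refilter, keyword tagging, re-split, normalize) with a single pass over the input lines that accumulates a buffer and flushes one normalized logical line per keyword line, plus a final flush.
import Mathlib
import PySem

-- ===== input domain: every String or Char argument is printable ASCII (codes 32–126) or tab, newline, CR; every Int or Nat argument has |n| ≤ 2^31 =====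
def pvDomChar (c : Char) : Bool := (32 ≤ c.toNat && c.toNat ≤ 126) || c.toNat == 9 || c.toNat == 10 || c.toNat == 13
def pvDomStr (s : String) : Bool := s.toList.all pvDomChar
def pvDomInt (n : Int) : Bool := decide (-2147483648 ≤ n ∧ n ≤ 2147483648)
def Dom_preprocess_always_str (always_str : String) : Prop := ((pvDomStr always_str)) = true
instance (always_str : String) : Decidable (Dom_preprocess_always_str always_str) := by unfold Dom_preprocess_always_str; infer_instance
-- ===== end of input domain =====

-- B normalizes the always-block in ONE pass (comment strip / blank skip / buffer + flush per keyword line)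
-- instead of A's four split/join passes; same return value, objective: simpler.

-- pieces of Python code that appear verbatim in BOTH sources:
-- the keyword list, line.split("//")[0], and ' '*indent + ' '.join(seg.split()) + '\n'
def pvKw : List (List Char) :=
  ["case".toList, "if".toList, "else".toList, ":".toList, ";".toList, "begin".toList, "end".toList]

def pvHasKw (l : List Char) : Bool := pvKw.any (fun k => PySem.Chars.isIn k l)

def pvStripComment (l : List Char) : List Char := (PySem.Chars.splitOn l ['/', '/']).headD []

def pvNorm (l : List Char) : List Char :=
  List.replicate (l.length - (PySem.Chars.lstrip l).length) ' '
    ++ PySem.Chars.join [' '] (PySem.Chars.split₀ l) ++ ['\n']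

-- ===== PORT A =====
def preprocess_always_str (always_str : String) : String :=
  -- 1. remove comments, drop blank lines, re-join
  let lines1 := PySem.Chars.splitOn always_str.toList ['\n']
  let lines2 := lines1.map pvStripComment
  let lines3 := lines2.filter (fun l => !(PySem.Chars.strip l).isEmpty)
  let s2 := PySem.Chars.join ['\n'] lines3
  -- 2. append '\n' to keyword lines, concatenate ("".join)
  let lines4 := PySem.Chars.splitOn s2 ['\n']
  let lines5 := lines4.map (fun l => if pvHasKw l then l ++ ['\n'] else l)
  let res1 := PySem.Chars.join [] lines5
  -- 3. normalize each '\n'-segment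
  let lines6 := PySem.Chars.splitOn res1 ['\n']
  let lines7 := lines6.map pvNorm
  String.ofList (PySem.Chars.join [] lines7)

-- ===== PORT B =====
def pvStep (st : List (List Char) × List Char) (raw : List Char) : List (List Char) × List Char :=
  let line := pvStripComment raw
  if (PySem.Chars.strip line).isEmpty then st
  else
    let buf := st.2 ++ line
    if pvHasKw line then (st.1 ++ [pvNorm buf], []) else (st.1, buf)

def preprocess_always_str_alt (always_str : String) : String :=
  let st := (PySem.Chars.splitOn always_str.toList ['\n']).foldl pvStep ([], [])
  String.ofList ((st.1 ++ [pvNorm st.2]).flatten)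

-- ===== PRECONDITION & SPEC =====
def Spec_preprocess_always_str (always_str : String) (out : String) : Prop := out = preprocess_always_str_alt always_str
instance (always_str : String) (out : String) : Decidable (Spec_preprocess_always_str always_str out) := by unfold Spec_preprocess_always_str; infer_instance

-- ===== CLAIM (what is proved, stated in full; the proofs are below) =====
def Claim_equal_preprocess_always_str : Prop := ∀ (always_str : String), Dom_preprocess_always_str always_str → Spec_preprocess_always_str always_str (preprocess_always_str always_str)

-- ===== LEMMAS AND PROOFS =====

-- structural model of s.split("\n")
def pvNSplit : List Char → List (List Char)
  | [] => [[]]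
  | c :: rest => if c = '\n' then [] :: pvNSplit rest else (pvNSplit rest).modifyHead (c :: ·)

-- logical grouping: keyword lines end a group, others are glued onto the next group
def pvGrp : List (List Char) → List (List Char)
  | [] => [[]]
  | l :: r => if pvHasKw l then l :: pvGrp r else (pvGrp r).modifyHead (l ++ ·)

lemma pv_modifyHead_nil (X : List (List Char)) : X.modifyHead (fun x => [] ++ x) = X := by
  cases X <;> simp

lemma pv_modifyHead_id (X : List (List Char)) : X.modifyHead (fun x => x) = X := by
  cases X <;> simp

lemma pv_go_nl (l : List Char) : ∀ (fuel : Nat) (cur : List Char) (acc : List (List Char)),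
    l.length < fuel →
    PySem.Chars.splitOn.go ['\n'] fuel l cur acc
      = acc.reverse ++ (pvNSplit l).modifyHead (fun x => cur.reverse ++ x) := by
  induction l with
  | nil =>
      intro fuel cur acc h
      cases fuel with
      | zero => omega
      | succ f => simp [PySem.Chars.splitOn.go, pvNSplit]
  | cons c rest ih =>
      intro fuel cur acc h
      cases fuel with
      | zero => omega
      | succ f =>
        rw [PySem.Chars.splitOn.go]
        have hp : List.isPrefixOf ['\n'] (c :: rest) = (c == '\n') := by
          simp [List.isPrefixOf, eq_comm]
        rw [hp]
        by_cases hc : c = '\n'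
        · rw [if_pos (by simp [hc])]
          have hd : List.drop (['\n'] : List Char).length (c :: rest) = rest := by simp
          rw [hd, ih f [] (cur.reverse :: acc) (by simp at h; omega)]
          simp [pvNSplit, hc, pv_modifyHead_id]
        · rw [if_neg (by simp [hc])]
          rw [ih f (c :: cur) acc (by simp at h; omega)]
          simp only [pvNSplit, hc, if_false, List.modifyHead_modifyHead]
          have he : (fun x : List Char => (c :: cur).reverse ++ x)
              = ((fun x => cur.reverse ++ x) ∘ fun x => c :: x) := by
            funext x; simp
          rw [he]

lemma pv_splitOn_nl (s : List Char) : PySem.Chars.splitOn s ['\n'] = pvNSplit s := by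
  unfold PySem.Chars.splitOn
  rw [pv_go_nl s (s.length + 1) [] [] (by omega)]
  simpa using pv_modifyHead_nil (pvNSplit s)

lemma pv_go_chars (fuel : Nat) : ∀ (sep l cur : List Char) (acc : List (List Char))
    (p : List Char), p ∈ PySem.Chars.splitOn.go sep fuel l cur acc → ∀ ch ∈ p,
    ch ∈ cur ∨ ch ∈ l ∨ ∃ q ∈ acc, ch ∈ q := by
  induction fuel with
  | zero =>
      intro sep l cur acc p hp ch hch
      simp [PySem.Chars.splitOn.go] at hp
      rcases hp with hp | hp
      · exact Or.inr (Or.inr ⟨p, hp, hch⟩)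
      · subst hp; simp at hch
        rcases hch with h | h
        · exact Or.inl h
        · exact Or.inr (Or.inl h)
  | succ f ih =>
      intro sep l cur acc p hp ch hch
      cases l with
      | nil =>
          simp [PySem.Chars.splitOn.go] at hp
          rcases hp with hp | hp
          · exact Or.inr (Or.inr ⟨p, hp, hch⟩)
          · subst hp; simp at hch; exact Or.inl hch
      | cons c restl =>
          rw [PySem.Chars.splitOn.go] at hp
          by_cases hpre : sep.isPrefixOf (c :: restl) = true
          · rw [if_pos hpre] at hp
            rcases ih sep _ [] _ p hp ch hch with h | h | ⟨q, hq, hchq⟩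
            · simp at h
            · exact Or.inr (Or.inl (List.drop_subset _ _ h))
            · rcases List.mem_cons.mp hq with hq | hq
              · subst hq; simp at hchq; exact Or.inl hchq
              · exact Or.inr (Or.inr ⟨q, hq, hchq⟩)
          · rw [if_neg hpre] at hp
            rcases ih sep _ _ _ p hp ch hch with h | h | ⟨q, hq, hchq⟩
            · rcases List.mem_cons.mp h with h | h
              · subst h; exact Or.inr (Or.inl (List.mem_cons_self))
              · exact Or.inl h
            · exact Or.inr (Or.inl (List.mem_cons_of_mem _ h))
            · exact Or.inr (Or.inr ⟨q, hq, hchq⟩)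

lemma pv_stripComment_subset (l : List Char) : ∀ ch ∈ pvStripComment l, ch ∈ l := by
  intro ch hch
  unfold pvStripComment at hch
  cases hsp : PySem.Chars.splitOn l ['/', '/'] with
  | nil => rw [hsp] at hch; simp at hch
  | cons a t =>
      rw [hsp] at hch; simp at hch
      have ha : a ∈ PySem.Chars.splitOn l ['/', '/'] := by rw [hsp]; exact List.mem_cons_self
      unfold PySem.Chars.splitOn at ha
      rcases pv_go_chars _ _ _ _ _ _ ha ch hch with h | h | ⟨q, hq, _⟩
      · simp at h
      · exact h
      · simp at hq

lemma pv_nsplit_ne_nil (s : List Char) : pvNSplit s ≠ [] := by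
  induction s with
  | nil => simp [pvNSplit]
  | cons c rest ih =>
      by_cases hc : c = '\n'
      · simp [pvNSplit, hc]
      · simp only [pvNSplit, hc, if_false]
        cases h : pvNSplit rest with
        | nil => exact absurd h ih
        | cons g gs => simp

lemma pv_nsplit_nlfree (s : List Char) : ∀ p ∈ pvNSplit s, '\n' ∉ p := by
  induction s with
  | nil => intro p hp; simp [pvNSplit] at hp; subst hp; simp
  | cons c rest ih =>
      intro p hp
      by_cases hc : c = '\n'
      · simp only [pvNSplit, hc, if_true, List.mem_cons] at hp
        rcases hp with hp | hp
        · subst hp; simp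
        · exact ih p hp
      · simp only [pvNSplit, hc, if_false] at hp
        cases h : pvNSplit rest with
        | nil => exact absurd h (pv_nsplit_ne_nil rest)
        | cons g gs =>
            rw [h] at hp
            simp only [List.modifyHead, List.mem_cons] at hp
            rcases hp with hp | hp
            · subst hp
              intro hmem
              rcases List.mem_cons.mp hmem with hh | hh
              · exact hc hh.symm
              · exact ih g (by rw [h]; exact List.mem_cons_self) hh
            · exact ih p (by rw [h]; exact List.mem_cons_of_mem _ hp)

lemma pv_join_nil_flatten (P : List (List Char)) : PySem.Chars.join [] P = P.flatten := by
  induction P with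
  | nil => simp [PySem.Chars.join, List.intercalate]
  | cons h t ih => cases t <;> simp_all [PySem.Chars.join, List.intercalate, List.intersperse]

lemma pv_nsplit_append (a t : List Char) (h : '\n' ∉ a) :
    pvNSplit (a ++ t) = (pvNSplit t).modifyHead (fun x => a ++ x) := by
  induction a with
  | nil => simpa using (pv_modifyHead_id (pvNSplit t)).symm
  | cons c a' ih =>
      have hc : c ≠ '\n' := fun hh => h (hh ▸ List.mem_cons_self)
      have ha' : '\n' ∉ a' := fun hh => h (List.mem_cons_of_mem _ hh)
      simp only [List.cons_append, pvNSplit, hc, if_false, ih ha', List.modifyHead_modifyHead]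
      rfl

lemma pv_nsplit_join (L : List (List Char)) (hne : L ≠ [])
    (hfree : ∀ l ∈ L, '\n' ∉ l) : pvNSplit (PySem.Chars.join ['\n'] L) = L := by
  induction L with
  | nil => exact absurd rfl hne
  | cons l rest ih =>
      cases rest with
      | nil =>
          rw [PySem.Chars.join_singleton]
          have := pv_nsplit_append l [] (hfree l List.mem_cons_self)
          simpa [pvNSplit] using this
      | cons l2 rest2 =>
          rw [PySem.Chars.join_cons_cons]
          have hfree' : ∀ x ∈ l2 :: rest2, '\n' ∉ x := fun x hx => hfree x (List.mem_cons_of_mem _ hx)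
          have : l ++ ['\n'] ++ PySem.Chars.join ['\n'] (l2 :: rest2)
              = l ++ ('\n' :: PySem.Chars.join ['\n'] (l2 :: rest2)) := by simp
          rw [this, pv_nsplit_append l _ (hfree l List.mem_cons_self)]
          have : pvNSplit ('\n' :: PySem.Chars.join ['\n'] (l2 :: rest2))
              = [] :: pvNSplit (PySem.Chars.join ['\n'] (l2 :: rest2)) := by simp [pvNSplit]
          rw [this, ih (by simp) hfree']
          simp [List.modifyHead]

lemma pv_nsplit_tags (L : List (List Char)) (hfree : ∀ l ∈ L, '\n' ∉ l) :
    pvNSplit ((L.map (fun l => if pvHasKw l then l ++ ['\n'] else l)).flatten) = pvGrp L := by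
  induction L with
  | nil => simp [pvNSplit, pvGrp]
  | cons l rest ih =>
      have hfree' : ∀ x ∈ rest, '\n' ∉ x := fun x hx => hfree x (List.mem_cons_of_mem _ hx)
      have hl : '\n' ∉ l := hfree l List.mem_cons_self
      simp only [List.map_cons, List.flatten_cons]
      by_cases hk : pvHasKw l
      · have : (if pvHasKw l then l ++ ['\n'] else l)
            ++ ((rest.map (fun l => if pvHasKw l then l ++ ['\n'] else l)).flatten)
            = l ++ ('\n' :: ((rest.map (fun l => if pvHasKw l then l ++ ['\n'] else l)).flatten)) := by
          simp [hk]
        rw [this, pv_nsplit_append l _ hl]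
        have : pvNSplit ('\n' :: ((rest.map (fun l => if pvHasKw l then l ++ ['\n'] else l)).flatten))
            = [] :: pvNSplit ((rest.map (fun l => if pvHasKw l then l ++ ['\n'] else l)).flatten) := by
          simp [pvNSplit]
        rw [this, ih hfree']
        simp [pvGrp, hk, List.modifyHead]
      · rw [if_neg hk, pv_nsplit_append l _ hl, ih hfree']
        simp [pvGrp, hk]

-- characterization of A: A's four passes compute the normalized groups of the filtered lines
lemma pv_A_char (s : String) :
    preprocess_always_str s = String.ofList
      (((pvGrp (((pvNSplit s.toList).map pvStripComment).filter
          (fun l => !(PySem.Chars.strip l).isEmpty))).map pvNorm).flatten) := by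
  simp only [preprocess_always_str, pv_splitOn_nl, pv_join_nil_flatten]
  set L := ((pvNSplit s.toList).map pvStripComment).filter
      (fun l => !(PySem.Chars.strip l).isEmpty) with hL
  have hfree : ∀ l ∈ L, '\n' ∉ l := by
    intro l hl hln
    rw [hL] at hl
    rcases List.mem_filter.mp hl with ⟨hl, _⟩
    rcases List.mem_map.mp hl with ⟨l0, hl0, rfl⟩
    exact pv_nsplit_nlfree s.toList l0 hl0 (pv_stripComment_subset l0 _ hln)
  by_cases hne : L = []
  · rw [hne]
    rfl
  · rw [pv_nsplit_join L hne hfree, pv_nsplit_tags L hfree]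

-- the pure per-kept-line step of B
def pvPure (st : List (List Char) × List Char) (l : List Char) : List (List Char) × List Char :=
  if pvHasKw l then (st.1 ++ [pvNorm (st.2 ++ l)], []) else (st.1, st.2 ++ l)

lemma pv_fold_filter (raws : List (List Char)) : ∀ st,
    raws.foldl pvStep st
      = ((raws.map pvStripComment).filter (fun l => !(PySem.Chars.strip l).isEmpty)).foldl pvPure st := by
  induction raws with
  | nil => intro st; simp
  | cons raw rest ih =>
      intro st
      simp only [List.foldl_cons, List.map_cons, List.filter_cons]
      by_cases hempty : (PySem.Chars.strip (pvStripComment raw)).isEmpty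
      · have h1 : pvStep st raw = st := by simp [pvStep, hempty]
        rw [h1, ih st]
        simp [hempty]
      · have h1 : pvStep st raw = pvPure st (pvStripComment raw) := by
          simp [pvStep, pvPure, hempty]
        rw [h1, ih]
        simp [hempty]

lemma pv_fold_main (L : List (List Char)) : ∀ (out : List (List Char)) (buf : List Char),
    (L.foldl pvPure (out, buf)).1 ++ [pvNorm (L.foldl pvPure (out, buf)).2]
      = out ++ ((pvGrp L).modifyHead (fun x => buf ++ x)).map pvNorm := by
  induction L with
  | nil => intro out buf; simp [pvGrp, List.modifyHead]
  | cons l rest ih =>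
      intro out buf
      by_cases hk : pvHasKw l
      · simp only [List.foldl_cons, pvPure, hk, if_true]
        rw [ih (out ++ [pvNorm (buf ++ l)]) []]
        simp only [pvGrp, hk, if_true, List.modifyHead, List.map_cons]
        cases pvGrp rest <;> simp
      · simp only [List.foldl_cons, pvPure, hk, Bool.false_eq_true, if_false]
        rw [ih out (buf ++ l)]
        simp only [pvGrp, hk, Bool.false_eq_true, if_false, List.modifyHead_modifyHead]
        have he : ((fun x => buf ++ x) ∘ fun x : List Char => l ++ x)
            = (fun x => (buf ++ l) ++ x) := by funext x; simp
        rw [he]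

lemma pv_B_char (s : String) :
    preprocess_always_str_alt s = String.ofList
      (((pvGrp (((pvNSplit s.toList).map pvStripComment).filter
          (fun l => !(PySem.Chars.strip l).isEmpty))).map pvNorm).flatten) := by
  simp only [preprocess_always_str_alt, pv_splitOn_nl, pv_fold_filter]
  rw [pv_fold_main]
  simp [pv_modifyHead_id]

-- ===== VERDICT (by name: the statement is the Claim_ definition above) =====
theorem preprocess_always_str_spec : Claim_equal_preprocess_always_str := by
  intro s _
  unfold Spec_preprocess_always_str
  rw [pv_A_char, pv_B_char]
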